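-- pv_equiv track=rewrite | github.com/JBreitenbr/fCC-Daily-Coding-Challenge | 04-2026.py | get_browser_history
-- ===== SOURCE A (Python) =====
-- class BrowserHistory:
--     def __init__(self):
--         self.backStack = []
--         self.forwardStack=[]
--     def visit(self, url: str):
--         self.forwardStack.clear()
--         self.backStack.append(url)
--     def back(self, steps: int):
--         while len(self.backStack) > 1 and steps > 0:
--                 self.forwardStack.append(self.backStack.pop())
--                 steps -= 1
--         return self.backStack[-1]
--     def forward(self, steps: int):
--         while len(self.forwardStack) > 0 and steps > 0:
--                 self.backStack.append(self.forwardStack.pop())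
--                 steps -= 1
--         return self.backStack[-1]
--
-- def get_browser_history(c):
--     sn=0
--     bf=["Back","Forward"]
--     if c[-1]=="Forward" and c[-2] not in bf:
--         c=c[0:-1]
--     for i in range(1,len(c)):
--         if not c[i] in bf:
--            sn+=1
--         if c[i]=="Back":
--                sn-=1
--         if c[i]=="Forward":
--                sn+=1
--     h=BrowserHistory()
--     for i in range(len(c)):
--         if not c[i] in bf:
--                 h.visit(c[i])
--         if c[i]=="Back":
--                 h.back(1)
--         if c[i]=="Forward":
--                 h.forward(1)
--     res=[]
--     res.append(h.backStack+h.forwardStack)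
--     res.append(max(sn,0))
--     return res
-- ===== SOURCE B (Python) =====
-- def get_browser_history(c):
--     bf = ("Back", "Forward")
--     if c[-1] == "Forward" and c[-2] not in bf:
--         c = c[:-1]
--     sn = sum(-1 if x == "Back" else 1 for x in c[1:])
--     history, cur = [], -1
--     for cmd in c:
--         if cmd == "Back":
--             if cur > 0:
--                 cur -= 1
--         elif cmd == "Forward":
--             if cur < len(history) - 1:
--                 cur += 1
--         else:
--             del history[cur + 1:]
--             history.append(cmd)
--             cur += 1
--     return [history[:cur + 1] + history[cur + 1:][::-1], max(sn, 0)]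
-- ===== Notes on version B (the rewrite author's own statement) =====
-- stated objective: simpler
-- what changed: Replaces A's two-stack BrowserHistory class (back/forward while-loops shuffling elements between stacks) by a single history list with an integer cursor, and replaces A's three-if counting loop by a sum over a per-command mapping; the final backStack+forwardStack value is reconstructed as history[:cur+1] + reversed(history[cur+1:]).
-- crash fix: On command lists starting with "Back", or starting with "Forward" and having a second element, A raises IndexError (it reads backStack[-1] on an empty stack, or c[-2] of a singleton); B returns the history built by ignoring the unusable leading Back/Forward steps. — e.g. on get_browser_history(["Back", "leetcode.com"]): A raises IndexError, B returns (["leetcode.com"], 1)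
import Mathlib
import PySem

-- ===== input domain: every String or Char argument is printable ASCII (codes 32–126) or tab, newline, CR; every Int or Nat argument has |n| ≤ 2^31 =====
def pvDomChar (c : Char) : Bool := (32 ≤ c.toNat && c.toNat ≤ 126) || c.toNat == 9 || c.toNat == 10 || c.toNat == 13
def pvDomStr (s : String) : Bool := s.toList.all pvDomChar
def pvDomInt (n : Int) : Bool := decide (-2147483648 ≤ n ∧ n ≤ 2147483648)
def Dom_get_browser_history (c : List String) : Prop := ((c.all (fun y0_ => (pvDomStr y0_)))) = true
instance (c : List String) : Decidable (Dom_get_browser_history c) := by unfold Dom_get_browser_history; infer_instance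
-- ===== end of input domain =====

-- B replaces A's two-stack BrowserHistory simulation by a single history list with an integer
-- cursor (objective: simpler); equivalence of the RETURN value is proved on Pre_.

-- ===== PORT A =====
-- bf = ["Back", "Forward"]
def pvBf : List String := ["Back", "Forward"]

-- BrowserHistory.back: while len(backStack) > 1 and steps > 0: forwardStack.append(backStack.pop())
-- (the method's return value backStack[-1] is unused by get_browser_history; Pre_ excludes the
-- inputs on which reading it would raise IndexError)
def pvBackLoop (bs fs : List String) (steps : Int) : List String × List String :=
  if h : 1 < bs.length ∧ 0 < steps then
    pvBackLoop bs.dropLast (fs ++ [bs.getLast!]) (steps - 1)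
  else (bs, fs)
termination_by steps.toNat
decreasing_by omega

-- BrowserHistory.forward: while len(forwardStack) > 0 and steps > 0: backStack.append(forwardStack.pop())
def pvForwardLoop (bs fs : List String) (steps : Int) : List String × List String :=
  if h : 0 < fs.length ∧ 0 < steps then
    pvForwardLoop (bs ++ [fs.getLast!]) fs.dropLast (steps - 1)
  else (bs, fs)
termination_by steps.toNat
decreasing_by omega

-- body of A's sn loop (the three successive ifs on c[i])
def pvSnStepA (sn : Int) (x : String) : Int :=
  let sn := if x ∉ pvBf then sn + 1 else sn
  let sn := if x = "Back" then sn - 1 else sn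
  if x = "Forward" then sn + 1 else sn

-- body of A's BrowserHistory loop; state = (h.backStack, h.forwardStack), list end = stack top
def pvStepA (st : List String × List String) (x : String) : List String × List String :=
  let st := if x ∉ pvBf then (st.1 ++ [x], ([] : List String)) else st   -- h.visit(c[i])
  let st := if x = "Back" then pvBackLoop st.1 st.2 1 else st            -- h.back(1)
  if x = "Forward" then pvForwardLoop st.1 st.2 1 else st                -- h.forward(1)

def get_browser_history (c : List String) : List String × Int :=
  -- if c[-1]=="Forward" and c[-2] not in bf: c = c[0:-1]   (short-circuit: c[-2] only read when
  -- c[-1]=="Forward"; pyGetD is exact there under Pre_)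
  let c := if PySem.List.pyGetD c (-1) "" = "Forward" ∧ PySem.List.pyGetD c (-2) "" ∉ pvBf
           then PySem.List.slice c (some 0) (some (-1)) else c
  -- for i in range(1, len(c)): …
  let sn := (PySem.List.pyRange 1 (c.length : Int) 1).foldl
      (fun sn i => pvSnStepA sn (PySem.List.pyGetD c i "")) (0 : Int)
  -- for i in range(len(c)): …
  let st := (PySem.List.pyRange 0 (c.length : Int) 1).foldl
      (fun st i => pvStepA st (PySem.List.pyGetD c i "")) (([], []) : List String × List String)
  (st.1 ++ st.2, max sn 0)

-- ===== PORT B =====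
-- per-command contribution to sn:  -1 if x == "Back" else 1
def pvSigB (x : String) : Int := if x = "Back" then -1 else 1

-- body of B's loop; state = (history, cur)
def pvStepB (st : List String × Int) (cmd : String) : List String × Int :=
  let (history, cur) := st
  if cmd = "Back" then (history, if 0 < cur then cur - 1 else cur)
  else if cmd = "Forward" then
    (history, if cur < (history.length : Int) - 1 then cur + 1 else cur)
  else (PySem.List.slice history none (some (cur + 1)) ++ [cmd], cur + 1)  -- del history[cur+1:]; history.append(cmd)

def get_browser_history_alt (c : List String) : List String × Int :=
  let c := if PySem.List.pyGetD c (-1) "" = "Forward" ∧ PySem.List.pyGetD c (-2) "" ∉ ["Back", "Forward"]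
           then PySem.List.slice c none (some (-1)) else c      -- c[:-1]
  let sn := ((PySem.List.slice c (some 1) none).map pvSigB).sum -- sum(… for x in c[1:])
  let hc := c.foldl pvStepB (([], -1) : List String × Int)
  -- history[:cur+1] + history[cur+1:][::-1]  ([::-1] is reverse: PySem.List.slice?_none_none_neg_one)
  (PySem.List.slice hc.1 none (some (hc.2 + 1)) ++ (PySem.List.slice hc.1 (some (hc.2 + 1)) none).reverse,
   max sn 0)

-- ===== PRECONDITION & SPEC =====
-- Pre_ excludes exactly the inputs on which Python A raises IndexError: the empty list (c[-1]),
-- and lists whose first command is "Back"/"Forward" (backStack[-1] read on an empty stack, or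
-- c[-2] on a singleton ["Forward"]).
def Pre_get_browser_history (c : List String) : Prop :=
  c ≠ [] ∧ c.head? ≠ some "Back" ∧ c.head? ≠ some "Forward"
instance (c : List String) : Decidable (Pre_get_browser_history c) := by
  unfold Pre_get_browser_history; infer_instance

def pvWitness_get_browser_history : List String := ["google.com", "facebook.com", "Back"]

-- A raises IndexError on commands that start with "Back", or with "Forward" followed by anything;
-- B returns the history built by ignoring the unusable leading Back/Forward steps.
def Raises_get_browser_history (c : List String) : Prop :=
  c.head? = some "Back" ∨ (2 ≤ c.length ∧ c.head? = some "Forward")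
instance (c : List String) : Decidable (Raises_get_browser_history c) := by
  unfold Raises_get_browser_history; infer_instance

def pvRaiseWitness_get_browser_history : List String := ["Back", "leetcode.com"]
def pvRaiseWitnessOut_get_browser_history : List String × Int := (["leetcode.com"], 1)

def Spec_get_browser_history (c : List String) (out : List String × Int) : Prop :=
  out = get_browser_history_alt c
instance (c : List String) (out : List String × Int) : Decidable (Spec_get_browser_history c out) := by
  unfold Spec_get_browser_history; infer_instance

-- ===== CLAIM (what is proved, stated in full; the proofs are below) =====
def Claim_equal_get_browser_history : Prop := ∀ (c : List String), Dom_get_browser_history c → Pre_get_browser_history c → Spec_get_browser_history c (get_browser_history c)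

def Claim_raises_get_browser_history : Prop := (∀ (c : List String), Dom_get_browser_history c → Raises_get_browser_history c → ¬ Pre_get_browser_history c) ∧ (Dom_get_browser_history (pvRaiseWitness_get_browser_history) ∧ Raises_get_browser_history (pvRaiseWitness_get_browser_history) ∧ get_browser_history_alt (pvRaiseWitness_get_browser_history) = pvRaiseWitnessOut_get_browser_history)

-- ===== LEMMAS AND PROOFS =====

-- the simulation map: A's (backStack, forwardStack) in terms of B's (history, cur)
def pvPhi (h : List String) (cur : Int) : List String × List String :=
  (h.take (cur + 1).toNat, (h.drop (cur + 1).toNat).reverse)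

theorem pv_getLast!_concat (l : List String) (a : String) : (l ++ [a]).getLast! = a := by
  induction l with
  | nil => rfl
  | cons x xs _ => simp [List.getLast!]

theorem pvBackLoop_one (bs fs : List String) :
    pvBackLoop bs fs 1 = if 1 < bs.length then (bs.dropLast, fs ++ [bs.getLast!]) else (bs, fs) := by
  rw [pvBackLoop]
  by_cases hc : 1 < bs.length
  · rw [dif_pos ⟨hc, one_pos⟩, if_pos hc, pvBackLoop, dif_neg (by omega)]
  · rw [dif_neg (by omega), if_neg hc]

theorem pvForwardLoop_one (bs fs : List String) :
    pvForwardLoop bs fs 1 = if 0 < fs.length then (bs ++ [fs.getLast!], fs.dropLast) else (bs, fs) := by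
  rw [pvForwardLoop]
  by_cases hc : 0 < fs.length
  · rw [dif_pos ⟨hc, one_pos⟩, if_pos hc, pvForwardLoop, dif_neg (by omega)]
  · rw [dif_neg (by omega), if_neg hc]

theorem pvStepA_back (st : List String × List String) :
    pvStepA st "Back" = pvBackLoop st.1 st.2 1 := by
  simp [pvStepA, pvBf]

theorem pvStepA_forward (st : List String × List String) :
    pvStepA st "Forward" = pvForwardLoop st.1 st.2 1 := by
  simp [pvStepA, pvBf]

theorem pvStepA_visit (st : List String × List String) (x : String) (hb : x ≠ "Back")
    (hf : x ≠ "Forward") : pvStepA st x = (st.1 ++ [x], []) := by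
  simp [pvStepA, pvBf, hb, hf]

theorem pv_step_sim (h : List String) (cur : Int) (hlo : -1 ≤ cur) (hhi : cur < (h.length : Int))
    (x : String) :
    pvStepA (pvPhi h cur) x = pvPhi (pvStepB (h, cur) x).1 (pvStepB (h, cur) x).2 ∧
      -1 ≤ (pvStepB (h, cur) x).2 ∧ (pvStepB (h, cur) x).2 < ((pvStepB (h, cur) x).1.length : Int) := by
  have hnle : (cur + 1).toNat ≤ h.length := by omega
  by_cases hb : x = "Back"
  · subst hb
    by_cases hgt : (0 : Int) < cur
    · have stB : pvStepB (h, cur) "Back" = (h, cur - 1) := by simp [pvStepB, hgt]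
      rw [stB]
      refine ⟨?_, by omega, by show cur - 1 < (h.length : Int); omega⟩
      have h1 : (cur + 1).toNat - 1 < h.length := by omega
      have htake : h.take (cur + 1).toNat
          = h.take ((cur + 1).toNat - 1) ++ [h[(cur + 1).toNat - 1]] := by
        conv_lhs => rw [show (cur + 1).toNat = ((cur + 1).toNat - 1) + 1 by omega]
        rw [List.take_add_one, List.getElem?_eq_getElem h1]
        rfl
      have hdrop : h.drop ((cur + 1).toNat - 1) = h[(cur + 1).toNat - 1] :: h.drop (cur + 1).toNat := by
        conv_lhs => rw [List.drop_eq_getElem_cons h1]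
        rw [show ((cur + 1).toNat - 1) + 1 = (cur + 1).toNat by omega]
      have hcn : (cur - 1 + 1).toNat = (cur + 1).toNat - 1 := by omega
      rw [pvStepA_back]
      simp only [pvPhi, hcn]
      rw [pvBackLoop_one, if_pos (by simp only [List.length_take]; omega)]
      rw [htake, List.dropLast_concat, pv_getLast!_concat, hdrop, List.reverse_cons]
    · have stB : pvStepB (h, cur) "Back" = (h, cur) := by simp [pvStepB, hgt]
      rw [stB]
      refine ⟨?_, hlo, hhi⟩
      rw [pvStepA_back]
      simp only [pvPhi]
      rw [pvBackLoop_one, if_neg (by simp only [List.length_take]; omega)]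
  · by_cases hf : x = "Forward"
    · subst hf
      by_cases hlt : cur < (h.length : Int) - 1
      · have stB : pvStepB (h, cur) "Forward" = (h, cur + 1) := by simp [pvStepB, hlt]
        rw [stB]
        refine ⟨?_, by omega, by show cur + 1 < (h.length : Int); omega⟩
        have hnlt : (cur + 1).toNat < h.length := by omega
        have htake : h.take ((cur + 1).toNat + 1)
            = h.take (cur + 1).toNat ++ [h[(cur + 1).toNat]] := by
          rw [List.take_add_one, List.getElem?_eq_getElem hnlt]
          rfl
        have hdrop : h.drop (cur + 1).toNat = h[(cur + 1).toNat] :: h.drop ((cur + 1).toNat + 1) :=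
          List.drop_eq_getElem_cons hnlt
        have hcn : (cur + 1 + 1).toNat = (cur + 1).toNat + 1 := by omega
        rw [pvStepA_forward]
        simp only [pvPhi, hcn]
        rw [pvForwardLoop_one, if_pos (by simp only [List.length_reverse, List.length_drop]; omega)]
        rw [hdrop, List.reverse_cons, List.dropLast_concat, pv_getLast!_concat, htake]
      · have stB : pvStepB (h, cur) "Forward" = (h, cur) := by simp [pvStepB, hlt]
        rw [stB]
        refine ⟨?_, hlo, hhi⟩
        rw [pvStepA_forward]
        simp only [pvPhi]
        rw [pvForwardLoop_one, if_neg (by simp only [List.length_reverse, List.length_drop]; omega)]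
    · have stB : pvStepB (h, cur) x
          = (h.take (cur + 1).toNat ++ [x], cur + 1) := by
        simp [pvStepB, hb, hf, PySem.List.slice_to h (by omega : (0:Int) ≤ cur + 1)]
      rw [stB]
      have hlen : (h.take (cur + 1).toNat ++ [x]).length = (cur + 1).toNat + 1 := by
        simp only [List.length_append, List.length_take, List.length_cons, List.length_nil]; omega
      refine ⟨?_, by omega, by show cur + 1 < ((h.take (cur + 1).toNat ++ [x]).length : Int); rw [hlen]; omega⟩
      have hcn : (cur + 1 + 1).toNat = (cur + 1).toNat + 1 := by omega
      have e1 : (h.take (cur + 1).toNat ++ [x]).take ((cur + 1).toNat + 1)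
          = h.take (cur + 1).toNat ++ [x] := List.take_of_length_le (by rw [hlen])
      have e2 : (h.take (cur + 1).toNat ++ [x]).drop ((cur + 1).toNat + 1) = [] :=
        List.drop_eq_nil_of_le (by rw [hlen])
      rw [pvStepA_visit _ x hb hf]
      simp only [pvPhi, hcn]
      rw [e1, e2, List.reverse_nil]

theorem pv_loop_sim (cs : List String) : ∀ (h : List String) (cur : Int), -1 ≤ cur →
    cur < (h.length : Int) →
    cs.foldl pvStepA (pvPhi h cur)
        = pvPhi (cs.foldl pvStepB (h, cur)).1 (cs.foldl pvStepB (h, cur)).2 ∧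
      -1 ≤ (cs.foldl pvStepB (h, cur)).2 ∧
      (cs.foldl pvStepB (h, cur)).2 < ((cs.foldl pvStepB (h, cur)).1.length : Int) := by
  induction cs with
  | nil => intro h cur hlo hhi; exact ⟨rfl, hlo, hhi⟩
  | cons x cs ih =>
    intro h cur hlo hhi
    obtain ⟨heq, hlo', hhi'⟩ := pv_step_sim h cur hlo hhi x
    have := ih (pvStepB (h, cur) x).1 (pvStepB (h, cur) x).2 hlo' hhi'
    simpa [List.foldl_cons, heq] using this

theorem pv_sn_eq (l : List String) (init : Int) :
    l.foldl pvSnStepA init = init + (l.map pvSigB).sum := by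
  have hfun : pvSnStepA = fun (sn : Int) (x : String) => sn + pvSigB x := by
    funext sn x
    by_cases hb : x = "Back" <;> by_cases hf : x = "Forward" <;>
      simp [pvSnStepA, pvSigB, pvBf, hb, hf] <;> omega
  rw [hfun]
  exact PySem.List.foldl_add l pvSigB init

-- ===== VERDICT (by name: the statement is the Claim_ definition above) =====
theorem get_browser_history_spec : Claim_equal_get_browser_history := by
  intro c _ _
  show get_browser_history c = get_browser_history_alt c
  simp only [get_browser_history, get_browser_history_alt, pvBf, PySem.List.slice_zero_start]
  generalize (if PySem.List.pyGetD c (-1) "" = "Forward"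
      ∧ PySem.List.pyGetD c (-2) "" ∉ ["Back", "Forward"]
    then PySem.List.slice c none (some (-1)) else c) = c'
  rw [PySem.List.foldl_pyRange_zero_pyGetD' c' "" pvStepA,
      PySem.List.foldl_pyRange_pyGetD' c' "" pvSnStepA 0 (by norm_num : (0:Int) ≤ 1)]
  rw [PySem.List.slice_from_one, show ((1:Int).toNat) = 1 from rfl, List.drop_one, pv_sn_eq,
      zero_add]
  have h0 : (([], []) : List String × List String) = pvPhi [] (-1) := rfl
  rw [h0]
  obtain ⟨heq, hlo, hhi⟩ := pv_loop_sim c' [] (-1) (by norm_num) (by simp)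
  rw [heq, PySem.List.slice_to _ (by omega : (0:Int) ≤ (c'.foldl pvStepB ([], -1)).2 + 1),
      PySem.List.slice_from _ (by omega : (0:Int) ≤ (c'.foldl pvStepB ([], -1)).2 + 1)]
  rfl

theorem get_browser_history_raises : Claim_raises_get_browser_history := by
  unfold Claim_raises_get_browser_history
  constructor
  · intro c _ hr hpre
    rcases hr with h1 | h2
    · exact hpre.2.1 h1
    · exact hpre.2.2 h2.2
  · exact ⟨by decide, by decide, by decide⟩

-- self-check: B's port really returns the stated value at the raise witness (projection of the claim)
theorem pvRaiseWitnessOut_ok :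
    get_browser_history_alt pvRaiseWitness_get_browser_history = pvRaiseWitnessOut_get_browser_history :=
  get_browser_history_raises.2.2.2
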